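-- pv_equiv track=rewrite | github.com/dsweet99/dryer | test/benchmark_data/module_012.py | compute_12_11
-- ===== SOURCE A (Python) =====
-- def compute_12_11(a, b, c):
--     x = a * 238 + b * 235
--     y = c * 190 - a * 209
--     for i in range(8):
--         x = x + i * 48
--         y = y - i * 35
--         if x > 6310:
--             x = x % 1655
--     return x + y + 133
-- ===== SOURCE B (Python) =====
-- def compute_12_11(a, b, c):
--     # Closed form: the mod can trigger at most once (after a mod, x <= 1654 and the
--     # remaining increments total < 4657), so find the first step i where the running
--     # prefix x0 + 48*(0+1+..+i) = x0 + 24*i*(i+1) exceeds 6310, apply the single mod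
--     # there, and add the rest of the increments in one shot.
--     x0 = a * 238 + b * 235
--     hit = next((i for i in range(8) if x0 + 24 * i * (i + 1) > 6310), None)
--     if hit is None:
--         x = x0 + 1344
--     else:
--         x = (x0 + 24 * hit * (hit + 1)) % 1655 + 24 * (56 - hit * (hit + 1))
--     y = c * 190 - a * 209 - 980
--     return x + y + 133
-- ===== Notes on version B (the rewrite author's own statement) =====
-- stated objective: alternative
-- what changed: Replaces the sequential 8-step loop by a closed form: y's decrement is the constant 980, and since the conditional mod can fire at most once, B finds the first prefix-sum index where x exceeds 6310, applies the single mod there, and adds the remaining increments in one shot.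
import Mathlib
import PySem

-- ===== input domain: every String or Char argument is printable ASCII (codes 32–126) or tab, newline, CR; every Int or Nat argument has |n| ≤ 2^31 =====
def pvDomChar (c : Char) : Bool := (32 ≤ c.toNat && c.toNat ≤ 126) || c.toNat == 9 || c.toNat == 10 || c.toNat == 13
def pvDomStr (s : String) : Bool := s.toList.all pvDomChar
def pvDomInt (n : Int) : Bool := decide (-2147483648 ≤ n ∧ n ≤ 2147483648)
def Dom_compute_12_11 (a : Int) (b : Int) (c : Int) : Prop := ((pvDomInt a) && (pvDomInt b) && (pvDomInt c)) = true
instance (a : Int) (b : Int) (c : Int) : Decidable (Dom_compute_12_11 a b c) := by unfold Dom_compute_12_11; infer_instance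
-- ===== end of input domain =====

-- B replaces A's sequential loop by a closed form (the single possible mod is located by a first-threshold search); return values proved equal.

-- ===== PORT A =====
def compute_12_11 (a : Int) (b : Int) (c : Int) : Int :=
  let x := a * 238 + b * 235
  let y := c * 190 - a * 209
  let p := (PySem.List.pyRange 0 8 1).foldl (fun (p : Int × Int) i =>
    let x := p.1 + i * 48
    let y := p.2 - i * 35
    let x := if x > 6310 then PySem.Int.mod x 1655 else x
    (x, y)) (x, y)
  p.1 + p.2 + 133

-- ===== PORT B =====
def compute_12_11_alt (a : Int) (b : Int) (c : Int) : Int :=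
  let x0 := a * 238 + b * 235
  let hit := (PySem.List.pyRange 0 8 1).find? (fun i => x0 + 24 * i * (i + 1) > 6310)
  let x := match hit with
    | none => x0 + 1344
    | some h => PySem.Int.mod (x0 + 24 * h * (h + 1)) 1655 + 24 * (56 - h * (h + 1))
  let y := c * 190 - a * 209 - 980
  x + y + 133

-- ===== PRECONDITION & SPEC =====
def Spec_compute_12_11 (a : Int) (b : Int) (c : Int) (out : Int) : Prop := out = compute_12_11_alt a b c
instance (a : Int) (b : Int) (c : Int) (out : Int) : Decidable (Spec_compute_12_11 a b c out) := by unfold Spec_compute_12_11; infer_instance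

-- ===== CLAIM =====
def Claim_equal_compute_12_11 : Prop := ∀ (a : Int) (b : Int) (c : Int), Dom_compute_12_11 a b c → Spec_compute_12_11 a b c (compute_12_11 a b c)

-- ===== LEMMAS AND PROOFS =====
theorem pv_mod_eq (x : Int) : PySem.Int.mod x 1655 = x % 1655 := by
  simp [PySem.Int.mod, Int.fmod_eq_emod]

-- A's paired fold splits: y accumulates -i*35 independently of x and the branch.
theorem pv_fold_split (l : List Int) (x0 y0 : Int) :
    l.foldl (fun (p : Int × Int) i =>
      let x := p.1 + i * 48
      let y := p.2 - i * 35
      let x := if x > 6310 then PySem.Int.mod x 1655 else x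
      (x, y)) (x0, y0)
    = (l.foldl (fun x i =>
        let x := x + i * 48
        if x > 6310 then PySem.Int.mod x 1655 else x) x0,
       y0 - 35 * l.sum) := by
  induction l generalizing x0 y0 with
  | nil => simp
  | cons h t ih => simp only [List.foldl_cons, List.sum_cons, ih]; exact Prod.ext rfl (by ring)

-- as long as the running value stays ≤ 6310 the loop just adds 48 * (sum of the indices)
theorem pv_no_mod (l : List Int) (x : Int) (h : x + 48 * l.sum ≤ 6310) (hpos : ∀ i ∈ l, 0 ≤ i) :
    l.foldl (fun x i => if x + i * 48 > 6310 then (x + i * 48) % 1655 else x + i * 48) x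
    = x + 48 * l.sum := by
  induction l generalizing x with
  | nil => simp
  | cons a t ih =>
    have ha : 0 ≤ a := hpos a (by simp)
    have hts : 0 ≤ t.sum := List.sum_nonneg (fun i hi => hpos i (List.mem_cons_of_mem _ hi))
    simp only [List.foldl_cons, List.sum_cons] at *
    rw [if_neg (by omega)]
    rw [ih _ (by omega) (fun i hi => hpos i (List.mem_cons_of_mem _ hi))]
    ring

-- find? on the concrete 8-element range, as nested ifs
theorem pv_find8 (x0 : Int) :
    ([0,1,2,3,4,5,6,7] : List Int).find? (fun i => x0 + 24 * i * (i + 1) > 6310)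
    = if 6310 < x0 then some 0 else if 6310 < x0 + 48 then some 1
      else if 6310 < x0 + 144 then some 2 else if 6310 < x0 + 288 then some 3
      else if 6310 < x0 + 480 then some 4 else if 6310 < x0 + 720 then some 5
      else if 6310 < x0 + 1008 then some 6 else if 6310 < x0 + 1344 then some 7
      else none := by
  by_cases h0 : 6310 < x0
  · rw [List.find?_cons_of_pos (by simp; omega), if_pos h0]
  rw [List.find?_cons_of_neg (by simp; omega), if_neg h0]
  by_cases h1 : 6310 < x0 + 48
  · rw [List.find?_cons_of_pos (by simp; omega), if_pos h1]
  rw [List.find?_cons_of_neg (by simp; omega), if_neg h1]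
  by_cases h2 : 6310 < x0 + 144
  · rw [List.find?_cons_of_pos (by simp; omega), if_pos h2]
  rw [List.find?_cons_of_neg (by simp; omega), if_neg h2]
  by_cases h3 : 6310 < x0 + 288
  · rw [List.find?_cons_of_pos (by simp; omega), if_pos h3]
  rw [List.find?_cons_of_neg (by simp; omega), if_neg h3]
  by_cases h4 : 6310 < x0 + 480
  · rw [List.find?_cons_of_pos (by simp; omega), if_pos h4]
  rw [List.find?_cons_of_neg (by simp; omega), if_neg h4]
  by_cases h5 : 6310 < x0 + 720
  · rw [List.find?_cons_of_pos (by simp; omega), if_pos h5]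
  rw [List.find?_cons_of_neg (by simp; omega), if_neg h5]
  by_cases h6 : 6310 < x0 + 1008
  · rw [List.find?_cons_of_pos (by simp; omega), if_pos h6]
  rw [List.find?_cons_of_neg (by simp; omega), if_neg h6]
  by_cases h7 : 6310 < x0 + 1344
  · rw [List.find?_cons_of_pos (by simp; omega), if_pos h7]
  rw [List.find?_cons_of_neg (by simp; omega), if_neg h7]
  rfl

-- one mod step followed by a mod-free tail
theorem pv_one_mod (l : List Int) (x : Int) (k : Int)
    (hx : x + k * 48 > 6310) (hpos : ∀ i ∈ l, 0 ≤ i)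
    (hsum : 1654 + 48 * l.sum ≤ 6310) :
    (k :: l).foldl (fun x i => if x + i * 48 > 6310 then (x + i * 48) % 1655 else x + i * 48) x
    = (x + k * 48) % 1655 + 48 * l.sum := by
  simp only [List.foldl_cons]
  rw [if_pos hx]
  exact pv_no_mod l _ (by omega) hpos

-- the x computation: loop vs. single-mod closed form
theorem pv_x (x0 : Int) :
    ([0,1,2,3,4,5,6,7] : List Int).foldl (fun x i =>
      let x := x + i * 48
      if x > 6310 then PySem.Int.mod x 1655 else x) x0
    = match ([0,1,2,3,4,5,6,7] : List Int).find? (fun i => x0 + 24 * i * (i + 1) > 6310) with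
      | none => x0 + 1344
      | some h => PySem.Int.mod (x0 + 24 * h * (h + 1)) 1655 + 24 * (56 - h * (h + 1)) := by
  rw [pv_find8]
  split_ifs with h0 h1 h2 h3 h4 h5 h6 h7 <;> simp only [pv_mod_eq]
  · -- hit = 0
    rw [show ([0,1,2,3,4,5,6,7] : List Int) = (0 : Int) :: [1,2,3,4,5,6,7] from rfl,
        pv_one_mod [1,2,3,4,5,6,7] _ _ (by omega) (by intro i hi; simp at hi; omega)
          (by simp only [List.sum_cons, List.sum_nil]; try omega)]
    simp only [List.sum_cons, List.sum_nil]
    ring_nf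
    try omega
  · -- hit = 1
    rw [show ([0,1,2,3,4,5,6,7] : List Int) = [0] ++ (1 : Int) :: [2,3,4,5,6,7] from rfl,
        List.foldl_append,
        pv_no_mod [0] _ (by simp only [List.sum_cons, List.sum_nil]; try omega) (by intro i hi; simp at hi; omega),
        pv_one_mod [2,3,4,5,6,7] _ _ (by simp only [List.sum_cons, List.sum_nil]; try omega) (by intro i hi; simp at hi; omega)
          (by simp only [List.sum_cons, List.sum_nil]; try omega)]
    simp only [List.sum_cons, List.sum_nil]
    ring_nf
    try omega
  · -- hit = 2
    rw [show ([0,1,2,3,4,5,6,7] : List Int) = [0,1] ++ (2 : Int) :: [3,4,5,6,7] from rfl,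
        List.foldl_append,
        pv_no_mod [0,1] _ (by simp only [List.sum_cons, List.sum_nil]; try omega) (by intro i hi; simp at hi; omega),
        pv_one_mod [3,4,5,6,7] _ _ (by simp only [List.sum_cons, List.sum_nil]; try omega) (by intro i hi; simp at hi; omega)
          (by simp only [List.sum_cons, List.sum_nil]; try omega)]
    simp only [List.sum_cons, List.sum_nil]
    ring_nf
    try omega
  · -- hit = 3
    rw [show ([0,1,2,3,4,5,6,7] : List Int) = [0,1,2] ++ (3 : Int) :: [4,5,6,7] from rfl,
        List.foldl_append,
        pv_no_mod [0,1,2] _ (by simp only [List.sum_cons, List.sum_nil]; try omega) (by intro i hi; simp at hi; omega),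
        pv_one_mod [4,5,6,7] _ _ (by simp only [List.sum_cons, List.sum_nil]; try omega) (by intro i hi; simp at hi; omega)
          (by simp only [List.sum_cons, List.sum_nil]; try omega)]
    simp only [List.sum_cons, List.sum_nil]
    ring_nf
    try omega
  · -- hit = 4
    rw [show ([0,1,2,3,4,5,6,7] : List Int) = [0,1,2,3] ++ (4 : Int) :: [5,6,7] from rfl,
        List.foldl_append,
        pv_no_mod [0,1,2,3] _ (by simp only [List.sum_cons, List.sum_nil]; try omega) (by intro i hi; simp at hi; omega),
        pv_one_mod [5,6,7] _ _ (by simp only [List.sum_cons, List.sum_nil]; try omega) (by intro i hi; simp at hi; omega)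
          (by simp only [List.sum_cons, List.sum_nil]; try omega)]
    simp only [List.sum_cons, List.sum_nil]
    ring_nf
    try omega
  · -- hit = 5
    rw [show ([0,1,2,3,4,5,6,7] : List Int) = [0,1,2,3,4] ++ (5 : Int) :: [6,7] from rfl,
        List.foldl_append,
        pv_no_mod [0,1,2,3,4] _ (by simp only [List.sum_cons, List.sum_nil]; try omega) (by intro i hi; simp at hi; omega),
        pv_one_mod [6,7] _ _ (by simp only [List.sum_cons, List.sum_nil]; try omega) (by intro i hi; simp at hi; omega)
          (by simp only [List.sum_cons, List.sum_nil]; try omega)]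
    simp only [List.sum_cons, List.sum_nil]
    ring_nf
    try omega
  · -- hit = 6
    rw [show ([0,1,2,3,4,5,6,7] : List Int) = [0,1,2,3,4,5] ++ (6 : Int) :: [7] from rfl,
        List.foldl_append,
        pv_no_mod [0,1,2,3,4,5] _ (by simp only [List.sum_cons, List.sum_nil]; try omega) (by intro i hi; simp at hi; omega),
        pv_one_mod [7] _ _ (by simp only [List.sum_cons, List.sum_nil]; try omega) (by intro i hi; simp at hi; omega)
          (by simp only [List.sum_cons, List.sum_nil]; try omega)]
    simp only [List.sum_cons, List.sum_nil]
    ring_nf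
    try omega
  · -- hit = 7
    rw [show ([0,1,2,3,4,5,6,7] : List Int) = [0,1,2,3,4,5,6] ++ (7 : Int) :: [] from rfl,
        List.foldl_append,
        pv_no_mod [0,1,2,3,4,5,6] _ (by simp only [List.sum_cons, List.sum_nil]; try omega) (by intro i hi; simp at hi; omega),
        pv_one_mod [] _ _ (by simp only [List.sum_cons, List.sum_nil]; try omega) (by intro i hi; simp at hi)
          (by simp only [List.sum_cons, List.sum_nil]; try omega)]
    simp only [List.sum_cons, List.sum_nil]
    ring_nf
    try omega
  · -- no hit: the mod never fires
    rw [pv_no_mod _ _ (by simp only [List.sum_cons, List.sum_nil]; try omega) (by intro i hi; simp at hi; omega)]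
    simp only [List.sum_cons, List.sum_nil]
    ring_nf

-- ===== VERDICT =====
theorem compute_12_11_spec : Claim_equal_compute_12_11 := by
  intro a b c _
  unfold Spec_compute_12_11 compute_12_11 compute_12_11_alt
  have h8 : PySem.List.pyRange 0 8 1 = [0,1,2,3,4,5,6,7] := by decide
  simp only [h8, pv_fold_split, pv_x]
  have hs : ([0,1,2,3,4,5,6,7] : List Int).sum = 28 := by decide
  rw [hs]
  rcases ([0,1,2,3,4,5,6,7] : List Int).find? (fun i => (a * 238 + b * 235) + 24 * i * (i + 1) > 6310) with _ | h <;> ring
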